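-- pv_equiv track=rewrite | github.com/FNNDSC/pfcon | pfcon/resources.py | localize_path_args
-- ===== SOURCE A (Python) =====
-- from typing import List, Collection
--
-- def localize_path_args(args: List[str], path_flags: Collection[str],
--                        input_dir: str) -> List[str]:
--     """
--     Replace the strings following path flags with the input directory.
--
--     https://github.com/FNNDSC/CHRIS_docs/blob/7ac85e9ae1070947e6e2cda62747b427028229b0/SPEC.adoc#path-arguments
--     """
--     if len(args) == 0:
--         return args
--
--     if args[0] in path_flags:
--         return [args[0], input_dir] + localize_path_args(args[2:], path_flags,
--                                                          input_dir)
--     return args[0:1] + localize_path_args(args[1:], path_flags, input_dir)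
-- ===== SOURCE B (Python) =====
-- def localize_path_args(args, path_flags, input_dir):
--     out = []
--     i = 0
--     n = len(args)
--     while i < n:
--         if args[i] in path_flags:
--             out.append(args[i])
--             out.append(input_dir)
--             i += 2
--         else:
--             out.append(args[i])
--             i += 1
--     return out
-- ===== Notes on version B (the rewrite author's own statement) =====
-- stated objective: faster
-- what changed: replaced A's recursion with list slicing and concatenation at every step by a single iterative index-driven pass appending to one result list
import Mathlib
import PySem

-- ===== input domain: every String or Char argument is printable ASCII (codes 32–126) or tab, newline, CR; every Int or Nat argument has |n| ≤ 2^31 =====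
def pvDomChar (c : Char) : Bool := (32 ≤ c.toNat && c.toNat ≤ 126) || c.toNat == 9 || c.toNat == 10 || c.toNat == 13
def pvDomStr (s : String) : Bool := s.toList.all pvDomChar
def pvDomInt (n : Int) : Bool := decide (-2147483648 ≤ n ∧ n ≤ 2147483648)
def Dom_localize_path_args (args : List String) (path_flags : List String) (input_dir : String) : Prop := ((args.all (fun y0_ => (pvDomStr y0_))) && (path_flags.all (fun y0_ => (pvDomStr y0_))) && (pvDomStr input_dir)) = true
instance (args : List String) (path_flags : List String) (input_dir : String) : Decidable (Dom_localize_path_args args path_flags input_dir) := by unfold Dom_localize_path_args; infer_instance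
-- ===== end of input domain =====

-- ===== PORT A =====
-- ===== PORT A =====
-- B is an iterative single pass; A recurses with slices. Return-value equivalence only (no mutation in either).
def localize_path_args (args : List String) (path_flags : List String) (input_dir : String) : List String :=
  if args.length = 0 then args
  else if path_flags.contains args.headI then
    [args.headI, input_dir] ++ localize_path_args (PySem.List.slice args (some 2) none) path_flags input_dir
  else
    PySem.List.slice args (some 0) (some 1) ++ localize_path_args (PySem.List.slice args (some 1) none) path_flags input_dir
termination_by args.length
decreasing_by
  · have : PySem.List.slice args (some 2) none = args.drop 2 := by
      have := PySem.List.slice_from_natCast (xs := args) (a := 2); simpa using this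
    simp [this]; omega
  · have : PySem.List.slice args (some 1) none = args.drop 1 := by
      have := PySem.List.slice_from_natCast (xs := args) (a := 1); simpa using this
    simp [this]; omega

-- ===== PORT B =====
-- the while loop of Source B: walk the list once, emitting into the result, skipping one element after a flag
def lpa_go (path_flags : List String) (input_dir : String) : List String → List String
  | [] => []
  | a :: rest =>
    if path_flags.contains a then a :: input_dir :: lpa_go path_flags input_dir rest.tail
    else a :: lpa_go path_flags input_dir rest
termination_by l => l.length
decreasing_by all_goals (simp [List.length_tail]; try omega)

def localize_path_args_alt (args : List String) (path_flags : List String) (input_dir : String) : List String :=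
  lpa_go path_flags input_dir args

-- ===== PRECONDITION & SPEC =====
def Spec_localize_path_args (args : List String) (path_flags : List String) (input_dir : String) (out : List String) : Prop := out = localize_path_args_alt args path_flags input_dir
instance (args : List String) (path_flags : List String) (input_dir : String) (out : List String) : Decidable (Spec_localize_path_args args path_flags input_dir out) := by unfold Spec_localize_path_args; infer_instance

-- ===== CLAIM (what is proved, stated in full; the proofs are below) =====
def Claim_equal_localize_path_args : Prop := ∀ (args : List String) (path_flags : List String) (input_dir : String), Dom_localize_path_args args path_flags input_dir → Spec_localize_path_args args path_flags input_dir (localize_path_args args path_flags input_dir)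

-- ===== LEMMAS AND PROOFS =====
theorem lpa_eq (path_flags : List String) (input_dir : String) :
    ∀ args : List String, localize_path_args args path_flags input_dir = lpa_go path_flags input_dir args := by
  intro args
  fun_induction localize_path_args args path_flags input_dir with
  | case1 xs h =>
    have : xs = [] := List.length_eq_zero_iff.mp (by omega)
    simp [this, lpa_go]
  | case2 xs h hmem ih =>
    obtain ⟨a, rest, rfl⟩ := List.exists_cons_of_ne_nil (l := xs) (fun h0 => h (by simp [h0]))
    have h2 : PySem.List.slice (a :: rest) (some 2) none = rest.tail := by
      have := PySem.List.slice_from_natCast (xs := a :: rest) (a := 2)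
      simpa [List.drop] using this
    simp only [List.headI] at hmem ⊢
    rw [lpa_go, if_pos hmem]
    simp [h2] at ih ⊢
    exact ih
  | case3 xs h hmem ih =>
    obtain ⟨a, rest, rfl⟩ := List.exists_cons_of_ne_nil (l := xs) (fun h0 => h (by simp [h0]))
    have h1 : PySem.List.slice (a :: rest) (some 1) none = rest := by
      have := PySem.List.slice_from_natCast (xs := a :: rest) (a := 1)
      simpa [List.drop] using this
    have h01 : PySem.List.slice (a :: rest) (some 0) (some 1) = [a] := by
      have := PySem.List.slice_natCast (xs := a :: rest) (a := 0) (b := 1)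
      simpa using this
    simp only [List.headI] at hmem
    rw [lpa_go, if_neg hmem]
    simp [h1, h01] at ih ⊢
    exact ih

-- ===== VERDICT (by name: the statement is the Claim_ definition above) =====
theorem localize_path_args_spec : Claim_equal_localize_path_args := by
  intro args pf d _
  unfold Spec_localize_path_args localize_path_args_alt
  exact lpa_eq pf d args
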